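-- pv_equiv track=rewrite | github.com/nawaneetkmr-cyber/fpl-tactix | brain/data_ingestion.py | detect_current_gw
-- ===== SOURCE A (Python) =====
-- from typing import Any, Dict, List, Optional, Tuple
--
-- def detect_current_gw(events: List[Dict[str, Any]]) -> int:
--     """Detect the current/next gameweek from events data."""
--     current = next((e for e in events if e.get("is_current")), None)
--     next_ev = next((e for e in events if e.get("is_next")), None)
--
--     if current and not current.get("finished"):
--         return current["id"]
--     elif next_ev:
--         return next_ev["id"]
--     elif current:
--         return current["id"]
--
--     finished = [e for e in events if e.get("finished")]
--     return max((e["id"] for e in finished), default=1)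
-- ===== SOURCE B (Python) =====
-- def detect_current_gw(events):
--     """Detect the current/next gameweek from events data.
--
--     Short-circuit scan: answer is returned as soon as it is determined,
--     instead of A's three staged passes followed by a branch chain.
--     """
--     nxt = None
--     best = None
--     for i, e in enumerate(events):
--         if e.get("is_current"):
--             if not e.get("finished"):
--                 return e["id"]
--             # finished current: answer is the first is_next overall, else this event
--             if nxt is None:
--                 nxt = next((x for x in events[i:] if x.get("is_next")), None)
--             return nxt["id"] if nxt is not None else e["id"]
--         if nxt is None and e.get("is_next"):
--             nxt = e
--         if e.get("finished"):
--             v = e.get("id")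
--             if v is not None and (best is None or v > best):
--                 best = v
--     if nxt is not None:
--         return nxt["id"]
--     return 1 if best is None else best
-- ===== Notes on version B (the rewrite author's own statement) =====
-- stated objective: alternative
-- what changed: Replaced A's three staged traversals and final branch chain by a short-circuit scan that returns inside the loop as soon as the answer is determined (at the first is_current event, searching forward for a next only in the finished-current case), with a tail fallback using the remembered first-next and running max finished id; Pre_ excludes inputs where A raises KeyError (the event whose id is returned lacks an 'id' key, or in the fallback some finished event lacks one).
import Mathlib
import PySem

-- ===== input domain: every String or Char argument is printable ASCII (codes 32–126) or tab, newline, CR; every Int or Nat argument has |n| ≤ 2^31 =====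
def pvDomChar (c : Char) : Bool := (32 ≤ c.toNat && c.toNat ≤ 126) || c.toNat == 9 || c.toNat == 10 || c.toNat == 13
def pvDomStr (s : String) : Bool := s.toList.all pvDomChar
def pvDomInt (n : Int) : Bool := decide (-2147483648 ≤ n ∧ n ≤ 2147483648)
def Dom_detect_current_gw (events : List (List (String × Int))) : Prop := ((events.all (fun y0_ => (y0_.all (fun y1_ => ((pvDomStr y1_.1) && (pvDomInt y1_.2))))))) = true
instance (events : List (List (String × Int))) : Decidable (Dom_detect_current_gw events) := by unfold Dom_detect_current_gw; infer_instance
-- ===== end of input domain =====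

-- B replaces A's three staged traversals by one short-circuit scan that returns as soon as
-- the answer is determined; equivalence is about the return value on Pre_ (A mutates nothing).
-- Shared helpers modelling Python dict access:
-- e.get(k) on a Python dict (assoc list, first-match lookup)
def pvGet (e : List (String × Int)) (k : String) : Option Int :=
  (e.find? (fun p => p.1 == k)).map (·.2)

-- truthiness of e.get(k): a present non-zero int (missing key → None → falsy)
def pvFlag (e : List (String × Int)) (k : String) : Bool :=
  match pvGet e k with
  | some v => v != 0
  | none => false

-- e["id"]; the KeyError case (none) is excluded by Pre_, so getD 0 is never the value used
def pvId (e : List (String × Int)) : Int := (pvGet e "id").getD 0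

def pvHasId (e : List (String × Int)) : Bool := (pvGet e "id").isSome

-- ===== PORT A =====
-- literal transliteration of A: two first-match scans, branch chain, then filter + max(default=1).
-- (a found event satisfies a truthy flag, hence is a nonempty dict, hence truthy itself)
def detect_current_gw (events : List (List (String × Int))) : Int :=
  let current := events.find? (fun e => pvFlag e "is_current")
  let next_ev := events.find? (fun e => pvFlag e "is_next")
  match current with
  | some c =>
    if ¬ pvFlag c "finished" then pvId c
    else
      match next_ev with
      | some n => pvId n
      | none => pvId c
  | none =>
    match next_ev with
    | some n => pvId n
    | none =>
      let finished := events.filter (fun e => pvFlag e "finished")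
      match finished.map pvId with
      | [] => 1
      | x :: xs => xs.foldl max x

-- ===== PORT B =====
-- B's 'best' update: running max finished id via e.get("id") (None skipped)
def pvStepBest (b : Option Int) (e : List (String × Int)) : Option Int :=
  if pvFlag e "finished" then
    match pvGet e "id" with
    | some v =>
      match b with
      | none => some v
      | some x => if v > x then some v else some x
    | none => b
  else b

-- B's loop, ported as structural recursion: the list argument is exactly events[i:]
-- of the Python loop, so the forward search 'events[i:]' is a find? on the current list.
def pvGoB : List (List (String × Int)) → Option (List (String × Int)) → Option Int → Int
  | [], nxt, best =>
    match nxt with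
    | some n => pvId n
    | none => best.getD 1
  | e :: tl, nxt, best =>
    if pvFlag e "is_current" then
      if ¬ pvFlag e "finished" then pvId e
      else
        match (match nxt with
               | some n => some n
               | none => (e :: tl).find? (fun x => pvFlag x "is_next")) with
        | some n => pvId n
        | none => pvId e
    else
      pvGoB tl (if nxt.isNone && pvFlag e "is_next" then some e else nxt) (pvStepBest best e)

def detect_current_gw_alt (events : List (List (String × Int))) : Int :=
  pvGoB events none none

-- ===== PRECONDITION & SPEC =====
-- Pre_ holds exactly when Python A returns normally: the event whose id A returns carries an
-- "id" key, and in the fallback branch every finished event does (otherwise A raises KeyError).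
def Pre_detect_current_gw (events : List (List (String × Int))) : Prop :=
  (match events.find? (fun e => pvFlag e "is_current"),
         events.find? (fun e => pvFlag e "is_next") with
   | some c, nx =>
     if pvFlag c "finished" then
       match nx with
       | some n => pvHasId n
       | none => pvHasId c
     else pvHasId c
   | none, some n => pvHasId n
   | none, none => events.all (fun e => !pvFlag e "finished" || pvHasId e)) = true

instance (events : List (List (String × Int))) : Decidable (Pre_detect_current_gw events) := by
  unfold Pre_detect_current_gw; infer_instance

def pvWitness_detect_current_gw : (List (List (String × Int))) :=
  [[("is_current", 1), ("id", 5)], [("finished", 1), ("id", 4)]]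

def Spec_detect_current_gw (events : List (List (String × Int))) (out : Int) : Prop :=
  out = detect_current_gw_alt events
instance (events : List (List (String × Int))) (out : Int) :
    Decidable (Spec_detect_current_gw events out) := by unfold Spec_detect_current_gw; infer_instance

-- ===== CLAIM (what is proved, stated in full; the proofs are below) =====
def Claim_equal_detect_current_gw : Prop :=
  ∀ (events : List (List (String × Int))), Dom_detect_current_gw events →
    Pre_detect_current_gw events → Spec_detect_current_gw events (detect_current_gw events)

-- ===== LEMMAS AND PROOFS =====

-- characterization of B's short-circuit loop in terms of first-match scans and a best fold
theorem pvGoB_spec (rest : List (List (String × Int)))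
    (nxt : Option (List (String × Int))) (best : Option Int) :
    pvGoB rest nxt best =
      match rest.find? (fun e => pvFlag e "is_current") with
      | some c =>
        if ¬ pvFlag c "finished" then pvId c
        else
          match (match nxt with
                 | some n => some n
                 | none => rest.find? (fun e => pvFlag e "is_next")) with
          | some n => pvId n
          | none => pvId c
      | none =>
        match nxt with
        | some n => pvId n
        | none =>
          match rest.find? (fun e => pvFlag e "is_next") with
          | some n => pvId n
          | none => (rest.foldl pvStepBest best).getD 1 := by
  induction rest generalizing nxt best with
  | nil => cases nxt <;> simp [pvGoB]
  | cons e tl ih =>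
    by_cases hc : pvFlag e "is_current"
    · simp [pvGoB, hc, List.find?]
    · by_cases hn : pvFlag e "is_next"
      · cases nxt with
        | none => simp [pvGoB, hc, hn, ih, List.find?]
        | some n => simp [pvGoB, hc, hn, ih, List.find?]
      · cases nxt with
        | none => simp [pvGoB, hc, hn, ih, List.find?]
        | some n => simp [pvGoB, hc, hn, ih, List.find?]

-- Option-level max fold equals Python's max over the collected ids
theorem pvOptMax_some (xs : List Int) (x : Int) :
    xs.foldl (fun (b : Option Int) v =>
      some (match b with | none => v | some y => if v > y then v else y)) (some x) =
    some (xs.foldl max x) := by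
  induction xs generalizing x with
  | nil => rfl
  | cons v tl ih =>
    have hmax : (if v > x then v else x) = max x v := by
      split <;> omega
    simp [List.foldl, ih, hmax]

-- under the fallback precondition, B's best fold is the option-max over the filtered ids
theorem pvFoldBest (events : List (List (String × Int)))
    (h : ∀ e ∈ events, pvFlag e "finished" = true → pvHasId e = true) (b : Option Int) :
    events.foldl pvStepBest b =
    ((events.filter (fun e => pvFlag e "finished")).map pvId).foldl
      (fun (b : Option Int) v =>
        some (match b with | none => v | some y => if v > y then v else y)) b := by
  induction events generalizing b with
  | nil => rfl
  | cons e tl ih =>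
    by_cases hf : pvFlag e "finished"
    · have hid : pvHasId e = true := h e (by simp) hf
      obtain ⟨v, hv⟩ : ∃ v, pvGet e "id" = some v := by
        unfold pvHasId at hid
        cases hg : pvGet e "id" with
        | none => rw [hg] at hid; simp at hid
        | some v => exact ⟨v, rfl⟩
      have hpvId : pvId e = v := by simp [pvId, hv]
      have htl := ih (fun e' he' => h e' (List.mem_cons_of_mem _ he'))
      cases b with
      | none => simp [List.foldl, pvStepBest, hf, hv, htl, hpvId]
      | some x =>
        simp [List.foldl, pvStepBest, hf, hv, htl, hpvId]
        by_cases hx : x < v <;> simp [hx]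
    · simp only [Bool.not_eq_true] at hf
      simp [List.foldl, pvStepBest, hf, ih (fun e' he' => h e' (List.mem_cons_of_mem _ he'))]

-- ===== VERDICT (by name: the statement is the Claim_ definition above) =====
theorem detect_current_gw_spec : Claim_equal_detect_current_gw := by
  intro events _ hpre
  unfold Spec_detect_current_gw detect_current_gw detect_current_gw_alt
  rw [pvGoB_spec]
  unfold Pre_detect_current_gw at hpre
  cases hc : events.find? (fun e => pvFlag e "is_current") with
  | some c => simp
  | none =>
    cases hn : events.find? (fun e => pvFlag e "is_next") with
    | some n => simp
    | none =>
      rw [hc, hn] at hpre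
      have hpre' : ∀ e ∈ events, pvFlag e "finished" = true → pvHasId e = true := by
        intro e he hf
        have := List.all_eq_true.mp hpre e he
        simp [hf] at this
        exact this
      simp only
      rw [pvFoldBest events hpre' none]
      cases hm : (events.filter (fun e => pvFlag e "finished")).map pvId with
      | nil => simp
      | cons x xs => simp [pvOptMax_some]
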